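-- pv_equiv track=rewrite | github.com/calivan0423/algorithm | fastcampus/기초문제 풀이/음계.py | Discrimination_des
-- ===== SOURCE A (Python) =====
-- def Discrimination_des(list):
--     type = True
--     a = list[0]
--
--     for i in range(1,len(list)):
--         if list[i] == (a-1):
--             a = list[i]
--             continue
--         else:
--             type = False
--             break
--
--     return type
-- ===== SOURCE B (Python) =====
-- def Discrimination_des(list):
--     a = list[0]
--     return list == [a - i for i in range(len(list))]
-- ===== Notes on version B (the rewrite author's own statement) =====
-- stated objective: simpler
-- what changed: Replaces the pairwise scan with break by building the closed-form expected descending sequence [a, a-1, ...] once and comparing whole lists.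
-- outside the precondition, e.g. on Discrimination_des([]): A raises IndexError, B raises IndexError
import Mathlib
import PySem

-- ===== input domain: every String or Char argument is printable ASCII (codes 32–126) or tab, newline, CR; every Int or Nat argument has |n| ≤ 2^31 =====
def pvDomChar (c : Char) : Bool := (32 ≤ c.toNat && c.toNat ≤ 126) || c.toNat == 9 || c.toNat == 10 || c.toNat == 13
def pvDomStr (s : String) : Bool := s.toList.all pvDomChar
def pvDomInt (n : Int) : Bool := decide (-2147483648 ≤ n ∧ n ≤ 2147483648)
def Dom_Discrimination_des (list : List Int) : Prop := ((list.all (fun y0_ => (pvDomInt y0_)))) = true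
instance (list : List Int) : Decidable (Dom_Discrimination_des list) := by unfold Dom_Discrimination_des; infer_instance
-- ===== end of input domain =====

-- B builds the closed-form expected descending sequence and compares lists, instead of A's pairwise scan with break (objective: simpler).
-- Pre_ excludes the empty list, on which both programs raise IndexError.


-- ===== PORT A =====
-- the for-loop over range(1, len(list)) with break, as structural recursion over the tail carrying a
def pvALoop (a : Int) : List Int → Bool
  | [] => true
  | x :: xs => if x = a - 1 then pvALoop x xs else false

def Discrimination_des (list : List Int) : Bool :=
  pvALoop (list.headD 0) (list.drop 1)

-- ===== PORT B =====
def Discrimination_des_alt (list : List Int) : Bool :=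
  list == (List.range list.length).map (fun (i : Nat) => list.headD 0 - (i : Int))

-- ===== PRECONDITION & SPEC =====
-- A raises IndexError on the empty list (list[0]); B does too.
def Pre_Discrimination_des (list : List Int) : Prop := list ≠ []
instance (list : List Int) : Decidable (Pre_Discrimination_des list) := by unfold Pre_Discrimination_des; infer_instance
def pvWitness_Discrimination_des : List Int := ([5, 4, 3])

def Spec_Discrimination_des (list : List Int) (out : Bool) : Prop := out = Discrimination_des_alt list
instance (list : List Int) (out : Bool) : Decidable (Spec_Discrimination_des list out) := by unfold Spec_Discrimination_des; infer_instance

-- ===== CLAIM =====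
def Claim_equal_Discrimination_des : Prop := ∀ (list : List Int), Dom_Discrimination_des list → Pre_Discrimination_des list → Spec_Discrimination_des list (Discrimination_des list)

-- ===== LEMMAS AND PROOFS =====
-- peeling the head off the expected descending sequence
theorem range_map_desc (a : Int) (n : Nat) :
    (List.range (n + 1)).map (fun (i : Nat) => a - (i : Int))
      = a :: (List.range n).map (fun (i : Nat) => (a - 1) - (i : Int)) := by
  apply List.ext_getElem
  · simp
  · intro i h1 h2
    simp only [List.getElem_map, List.getElem_range]
    cases i with
    | zero => simp
    | succ j =>
      simp only [List.getElem_cons_succ, List.getElem_map, List.getElem_range]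
      push_cast
      ring

theorem pvALoop_eq (t : List Int) : ∀ (a : Int),
    pvALoop a t = decide (t = (List.range t.length).map (fun (i : Nat) => (a - 1) - (i : Int))) := by
  induction t with
  | nil => intro a; simp [pvALoop]
  | cons x xs ih =>
    intro a
    rw [pvALoop, List.length_cons, range_map_desc (a - 1) xs.length]
    by_cases h : x = a - 1
    · subst h
      rw [ih (a - 1)]
      simp
    · simp [h]

-- ===== VERDICT =====
theorem Discrimination_des_spec : Claim_equal_Discrimination_des := by
  intro l _ hpre
  unfold Spec_Discrimination_des Discrimination_des Discrimination_des_alt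
  match l, hpre with
  | a :: t, _ =>
    rw [show (a :: t).headD 0 = a from rfl, show (a :: t).drop 1 = t from rfl,
      List.length_cons, range_map_desc a t.length, pvALoop_eq]
    simp [beq_eq_decide]
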